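-- pv_equiv track=rewrite | github.com/mikikora/University | python/python_lista11/formula_logiczna.py | zmienne
-- ===== SOURCE A (Python) =====
-- def zmienne(F):
--     z = set('abcdefgijklomnopqrstuvwzyzx')
--     wynik = list()
--     i = 0
--     while i < len(F):
--         if F[i] in z:
--             zmienna = ''
--             while i < len(F) and F[i] in z:
--                 zmienna += F[i]
--                 i += 1
--             wynik.append(zmienna)
--         else:
--             i += 1
--
--     return wynik
-- ===== SOURCE B (Python) =====
-- def zmienne(F):
--     z = set('abcdefgijklomnopqrstuvwzyzx')
--     wynik = []
--     prev = False
--     for c in F: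
--         cur = c in z
--         if cur:
--             if prev:
--                 wynik[-1] += c
--             else:
--                 wynik.append(c)
--         prev = cur
--     return wynik
-- ===== Notes on version B (the rewrite author's own statement) =====
-- stated objective: simpler
-- what changed: Replaced the index-driven outer while-loop with a nested inner while by a single for-each pass carrying a previous-char-was-a-letter flag that either extends the last token or starts a new one.
import Mathlib
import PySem

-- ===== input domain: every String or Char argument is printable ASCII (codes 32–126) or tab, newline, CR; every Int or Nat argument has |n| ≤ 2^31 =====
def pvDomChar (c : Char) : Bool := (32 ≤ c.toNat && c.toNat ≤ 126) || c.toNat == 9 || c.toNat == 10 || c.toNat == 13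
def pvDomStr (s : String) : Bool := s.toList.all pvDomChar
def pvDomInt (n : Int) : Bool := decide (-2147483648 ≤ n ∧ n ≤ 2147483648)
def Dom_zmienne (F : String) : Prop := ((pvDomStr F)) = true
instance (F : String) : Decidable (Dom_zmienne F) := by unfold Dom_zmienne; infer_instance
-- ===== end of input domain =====

-- B replaces A's index-driven outer/inner while loops by a single pass with a
-- previous-char-was-a-letter flag, extending the last token in place (objective: simpler).

-- the letter set z = set('abcdefgijklomnopqrstuvwzyzx') (all lowercase letters except 'h');
-- 'c in z' is membership in the distinct characters of that literal (exact).
def zLetter (c : Char) : Bool := "abcdefgijklomnopqrstuvwzyzx".toList.contains c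

-- ===== PORT A =====
-- inner while: consume letters into the accumulator, return (token, rest)
def takeRun : List Char → List Char → List Char × List Char
  | [], acc => (acc, [])
  | c :: rest, acc => if zLetter c then takeRun rest (acc ++ [c]) else (acc, c :: rest)

theorem takeRun_spec (l acc : List Char) :
    takeRun l acc = (acc ++ l.takeWhile zLetter, l.dropWhile zLetter) := by
  induction l generalizing acc with
  | nil => simp [takeRun]
  | cons c rest ih =>
    simp only [takeRun, List.takeWhile, List.dropWhile]
    cases h : zLetter c <;> simp [ih]

-- outer while over the remaining characters
def loopA : List Char → List String
  | [] => []
  | c :: rest =>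
    if h : zLetter c then
      String.ofList (takeRun (c :: rest) []).1 :: loopA (takeRun (c :: rest) []).2
    else
      loopA rest
termination_by l => l.length
decreasing_by
  · simp only [takeRun_spec, List.dropWhile, h]
    exact Nat.lt_succ_of_le (List.length_dropWhile_le _ _)
  · simp

def zmienne (F : String) : List String := loopA F.toList

-- ===== PORT B =====
-- wynik[-1] += c : extend the last group
def appendLast : List (List Char) → Char → List (List Char)
  | [], _ => []
  | [g], c => [g ++ [c]]
  | g :: gs, c => g :: appendLast gs c

-- one iteration of B's for-loop; state = (wynik, prev)
def stepB (st : List (List Char) × Bool) (c : Char) : List (List Char) × Bool :=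
  let cur := zLetter c
  if cur then
    (if st.2 then appendLast st.1 c else st.1 ++ [[c]], cur)
  else
    (st.1, cur)

def zmienne_alt (F : String) : List String :=
  ((F.toList.foldl stepB ([], false)).1).map String.ofList

-- ===== PRECONDITION & SPEC =====
def Spec_zmienne (F : String) (out : List String) : Prop := out = zmienne_alt F
instance (F : String) (out : List String) : Decidable (Spec_zmienne F out) := by unfold Spec_zmienne; infer_instance

-- ===== CLAIM (what is proved, stated in full; the proofs are below) =====
def Claim_equal_zmienne : Prop := ∀ (F : String), Dom_zmienne F → Spec_zmienne F (zmienne F)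

-- ===== LEMMAS AND PROOFS =====

theorem appendLast_concat (gs : List (List Char)) (g : List Char) (c : Char) :
    appendLast (gs ++ [g]) c = gs ++ [g ++ [c]] := by
  induction gs with
  | nil => simp [appendLast]
  | cons h t ih =>
    cases t with
    | nil => simp [appendLast]
    | cons h' t' => simpa [appendLast] using ih

-- prefix invariance of B's fold: earlier, finished groups are never touched again
theorem foldB_prefix (l : List Char) :
    (∀ gs : List (List Char),
        (l.foldl stepB (gs, false)).1 = gs ++ (l.foldl stepB ([], false)).1) ∧
    (∀ (gs : List (List Char)) (g : List Char),
        (l.foldl stepB (gs ++ [g], true)).1 = gs ++ (l.foldl stepB ([g], true)).1) := by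
  induction l with
  | nil => simp
  | cons c rest ih =>
    obtain ⟨ih1, ih2⟩ := ih
    constructor
    · intro gs
      by_cases h : zLetter c = true
      · simp only [List.foldl_cons, stepB, h, if_pos, if_neg Bool.false_ne_true]
        simpa using ih2 gs [c]
      · simp only [List.foldl_cons, stepB, Bool.not_eq_true] at *
        simp only [h]
        simpa using ih1 gs
    · intro gs g
      by_cases h : zLetter c = true
      · simp only [List.foldl_cons, stepB, h, if_pos]
        rw [appendLast_concat]
        have h2 : appendLast [g] c = [g ++ [c]] := by simp [appendLast]
        simp only [h2]
        simpa using ih2 gs (g ++ [c])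
      · simp only [Bool.not_eq_true] at h
        simp only [List.foldl_cons, stepB, h, if_neg Bool.false_ne_true]
        have e1 := ih1 (gs ++ [g])
        have e2 := ih1 [g]
        simp only [e1, e2, List.append_assoc]
  
-- B's fold started inside a run: the current group absorbs the run's remainder
theorem foldB_run (l : List Char) (g : List Char) :
    (l.foldl stepB ([g], true)).1 =
      (g ++ l.takeWhile zLetter) :: (((l.dropWhile zLetter).foldl stepB ([], false)).1) := by
  induction l generalizing g with
  | nil => simp
  | cons c rest ih =>
    by_cases h : zLetter c = true
    · simp only [List.foldl_cons, stepB, h, if_pos]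
      have h2 : appendLast [g] c = [g ++ [c]] := by simp [appendLast]
      rw [h2, ih (g ++ [c])]
      simp [List.takeWhile, List.dropWhile, h]
    · simp only [Bool.not_eq_true] at h
      simp only [List.foldl_cons, stepB, h, if_neg Bool.false_ne_true]
      have e := (foldB_prefix rest).1 [g]
      rw [e]
      simp [List.takeWhile, List.dropWhile, h, stepB]

theorem loopA_eq_foldB (l : List Char) :
    loopA l = ((l.foldl stepB ([], false)).1).map String.ofList := by
  induction l using loopA.induct with
  | case1 => simp [loopA]
  | case2 c rest h ih =>
    rw [loopA]
    simp only [dif_pos h]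
    rw [takeRun_spec] at ih ⊢
    simp only [List.takeWhile, List.dropWhile, h] at ih ⊢
    rw [ih]
    simp only [List.foldl_cons, stepB, h, if_pos, if_neg Bool.false_ne_true, List.nil_append]
    rw [foldB_run rest [c]]
    simp
  | case3 c rest h ih =>
    simp only [Bool.not_eq_true] at h
    rw [loopA]
    simp only [h, Bool.false_eq_true]
    rw [ih]
    simp [stepB, h]

-- ===== VERDICT (by name: the statement is the Claim_ definition above) =====
theorem zmienne_spec : Claim_equal_zmienne := by
  intro F _
  unfold Spec_zmienne zmienne zmienne_alt
  exact loopA_eq_foldB F.toList
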